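-- pv_equiv track=rewrite | github.com/flypigzju/TileLevel | Tools/tile_tetris_random_pattern_gen.py | coords_from_bitmask_4x4
-- ===== SOURCE A (Python) =====
-- from typing import List, Tuple, Dict, Optional
--
-- Coord = Tuple[int, int]
--
-- def coords_from_bitmask_4x4(mask: int, n: int = 4) -> List[Coord]:
--     coords = []
--     for i in range(n * n):
--         if (mask >> i) & 1:
--             x = i % n
--             y = i // n
--             coords.append((x, y))
--     return coords
-- ===== SOURCE B (Python) =====
-- def coords_from_bitmask_4x4(mask, n=4):
--     # Restrict to the n*n-bit window (Python % with a positive modulus keeps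
--     # exactly bits 0..n*n-1, also for negative masks), then visit ONLY the set
--     # bits: m & (m - 1) clears the lowest set bit, and the bit_length of the
--     # cleared-off part gives its index directly.
--     m = mask % (1 << n * n)
--     coords = []
--     while m:
--         m2 = m & (m - 1)                  # m with its lowest set bit cleared
--         i = (m - m2).bit_length() - 1     # index of that bit
--         coords.append((i % n, i // n))
--         m = m2
--     return coords
-- ===== Notes on version B (the rewrite author's own statement) =====
-- stated objective: faster
-- what changed: Instead of scanning all n*n bit positions with an index loop, B reduces the mask to the n*n-bit window with one modulo and then visits only the SET bits: each iteration clears the lowest set bit via m & (m-1) and recovers its coordinate index from the bit_length of the cleared-off bit, so the loop runs once per set bit instead of once per position.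
import Mathlib
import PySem

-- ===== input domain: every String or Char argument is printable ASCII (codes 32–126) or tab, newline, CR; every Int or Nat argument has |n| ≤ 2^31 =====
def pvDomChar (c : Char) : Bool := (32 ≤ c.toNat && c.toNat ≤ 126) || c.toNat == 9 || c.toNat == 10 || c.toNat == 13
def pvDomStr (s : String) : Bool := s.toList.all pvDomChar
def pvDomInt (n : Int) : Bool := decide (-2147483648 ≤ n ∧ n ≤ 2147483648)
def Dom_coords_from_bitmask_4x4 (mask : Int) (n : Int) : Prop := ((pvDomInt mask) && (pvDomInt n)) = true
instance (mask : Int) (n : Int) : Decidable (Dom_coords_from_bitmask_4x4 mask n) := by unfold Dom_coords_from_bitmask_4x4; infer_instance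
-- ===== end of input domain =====

-- B replaces A's scan over all n*n bit positions by a clear-lowest-set-bit loop:
-- after one modulo restricting the mask to the n*n-bit window, each iteration
-- clears the lowest set bit with m & (m-1) and reads its index off bit_length,
-- so only the SET bits are visited (objective: alternative, exact same results).

-- ===== PORT A =====
-- the range index i satisfies 0 ≤ i, so Python's 'mask >> i' is exactly the shift by i.toNat
def coords_from_bitmask_4x4 (mask : Int) (n : Int) : List (Int × Int) :=
  (PySem.List.pyRange 0 (n * n) 1).foldl
    (fun coords i =>
      if PySem.Int.band (mask >>> ((i.toNat : Int))) 1 ≠ 0 then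
        coords ++ [(PySem.Int.mod i n, PySem.Int.floordiv i n)]
      else coords) []

-- ===== PORT B =====
-- the while loop of Source B: m = mask % (1 << n*n) is nonnegative (Python % with a
-- positive modulus) and m & (m-1) keeps it so, hence 'while m:' is 'while m > 0'
-- here; 'm & (m-1)' is PySem.Int.band, '(m - m2).bit_length()' is PySem.Int.bitLength — exact
def coordsGoB (n : Int) (m : Int) : List (Int × Int) :=
  if h : m ≤ 0 then []
  else
    let m2 := PySem.Int.band m (m - 1)
    let i : Int := (PySem.Int.bitLength (m - m2) : Int) - 1
    (PySem.Int.mod i n, PySem.Int.floordiv i n) :: coordsGoB n m2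
  termination_by m.toNat
  decreasing_by
    have h0 : 0 ≤ m - 1 := by omega
    have hb : PySem.Int.band m (m - 1) = ((m.toNat &&& (m - 1).toNat : Nat) : Int) :=
      PySem.Int.band_of_nonneg (by omega) h0
    have hle : m.toNat &&& (m - 1).toNat ≤ (m - 1).toNat := Nat.and_le_right
    simp only [hb]
    omega

-- 'mask % (1 << n * n)': n * n ≥ 0, so the shift amount (n * n).toNat is exact
def coords_from_bitmask_4x4_alt (mask : Int) (n : Int) : List (Int × Int) :=
  coordsGoB n (PySem.Int.mod mask ((1 : Int) <<< (n * n).toNat))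

-- ===== PRECONDITION & SPEC =====
def Spec_coords_from_bitmask_4x4 (mask : Int) (n : Int) (out : List (Int × Int)) : Prop := out = coords_from_bitmask_4x4_alt mask n
instance (mask : Int) (n : Int) (out : List (Int × Int)) : Decidable (Spec_coords_from_bitmask_4x4 mask n out) := by unfold Spec_coords_from_bitmask_4x4; infer_instance

-- ===== CLAIM (what is proved, stated in full; the proofs are below) =====
def Claim_equal_coords_from_bitmask_4x4 : Prop := ∀ (mask : Int) (n : Int), Dom_coords_from_bitmask_4x4 mask n → Spec_coords_from_bitmask_4x4 mask n (coords_from_bitmask_4x4 mask n)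

-- ===== LEMMAS AND PROOFS =====

theorem band_one_eq (m : Int) : PySem.Int.band m 1 = m % 2 := by
  simp [PySem.Int.band]; split_ifs with h <;> omega

theorem window_bit (mask : Int) (T j : Nat) (hj : j < T) :
    mask / 2 ^ j % 2 = (((mask % 2 ^ T).toNat / 2 ^ j % 2 : Nat) : Int) := by
  have hpos : (0:Int) < 2 ^ T := by positivity
  have hr0 : 0 ≤ mask % 2 ^ T := Int.emod_nonneg mask (ne_of_gt hpos)
  have hTj : (2:Int) ^ (T - j) * 2 ^ j = 2 ^ T := by
    rw [← pow_add]; congr 1; omega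
  have h1 : mask % 2 ^ T + 2 ^ T * (mask / 2 ^ T) = mask := Int.emod_add_mul_ediv mask (2 ^ T)
  have hq : mask = mask % 2 ^ T + (mask / 2 ^ T * 2 ^ (T - j)) * 2 ^ j := by
    have h2 : (mask / 2 ^ T * 2 ^ (T - j)) * 2 ^ j = 2 ^ T * (mask / 2 ^ T) := by
      rw [mul_assoc, hTj]; ring
    linarith
  have hsplit : (2:Int) ^ (T - j) = 2 * 2 ^ (T - j - 1) := by
    rw [← pow_succ']; congr 1; omega
  calc mask / 2 ^ j % 2
      = (mask % 2 ^ T + (mask / 2 ^ T * 2 ^ (T - j)) * 2 ^ j) / 2 ^ j % 2 := by rw [← hq]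
    _ = (mask % 2 ^ T / 2 ^ j + mask / 2 ^ T * 2 ^ (T - j)) % 2 := by
        rw [Int.add_mul_ediv_right _ _ (by positivity : (2:Int) ^ j ≠ 0)]
    _ = (mask % 2 ^ T / 2 ^ j + 2 * (mask / 2 ^ T * 2 ^ (T - j - 1))) % 2 := by
        congr 1; rw [hsplit]; ring
    _ = mask % 2 ^ T / 2 ^ j % 2 := Int.add_mul_emod_self_left _ _ _
    _ = (((mask % 2 ^ T).toNat / 2 ^ j % 2 : Nat) : Int) := by
        conv_lhs => rw [← Int.toNat_of_nonneg hr0]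
        push_cast
        ring

theorem foldlA_eq (mask n : Int) (l : List Int) (acc : List (Int × Int)) :
    l.foldl (fun coords i =>
        if PySem.Int.band (mask >>> ((i.toNat : Int))) 1 ≠ 0 then
          coords ++ [(PySem.Int.mod i n, PySem.Int.floordiv i n)]
        else coords) acc
      = acc ++ (l.filter (fun i : Int => decide (PySem.Int.band (mask >>> ((i.toNat : Int))) 1 ≠ 0))).map
          (fun i : Int => (PySem.Int.mod i n, PySem.Int.floordiv i n)) := by
  induction l generalizing acc with
  | nil => simp
  | cons x xs ih =>
      rw [List.foldl_cons]
      by_cases h : PySem.Int.band (mask >>> ((x.toNat : Int))) 1 ≠ 0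
      · rw [if_pos h, ih, List.filter_cons, if_pos (decide_eq_true h), List.map_cons,
          List.append_assoc]
        rfl
      · rw [if_neg h, ih, List.filter_cons, if_neg (by simp only [decide_eq_true_eq]; exact h)]

-- m & (m-1) on a positive m = 2^k*(2q+1) clears the lowest set bit: the result is 2^(k+1)*q
theorem land_clear_lowest (k q : Nat) :
    (2^k*(2*q+1)) &&& (2^k*(2*q+1) - 1) = 2^(k+1)*q := by
  induction k generalizing q with
  | zero =>
      apply Nat.eq_of_testBit_eq
      intro j
      cases j with
      | zero => simp [Nat.testBit_zero]
      | succ j =>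
          rw [Nat.testBit_and, Nat.testBit_add_one, Nat.testBit_add_one, Nat.testBit_add_one]
          have h1 : (2^0*(2*q+1))/2 = q := by omega
          have h2 : (2^0*(2*q+1)-1)/2 = q := by omega
          have h3 : (2^(0+1)*q)/2 = q := by omega
          rw [h1, h2, h3, Bool.and_self]
  | succ k ih =>
      have hE1 : 2^(k+1)*(2*q+1) = 2*(2^k*(2*q+1)) := by ring
      have hE2 : 2^(k+1+1)*q = 2*(2^(k+1)*q) := by ring
      have hN : (0:Nat) < 2^k*(2*q+1) := by positivity
      have e1 : (2^(k+1)*(2*q+1)) % 2 = 0 := by rw [hE1]; omega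
      have e2 : (2^(k+1+1)*q) % 2 = 0 := by rw [hE2]; omega
      have h1 : (2^(k+1)*(2*q+1))/2 = 2^k*(2*q+1) := by rw [hE1]; omega
      have h2 : (2^(k+1)*(2*q+1)-1)/2 = 2^k*(2*q+1)-1 := by rw [hE1]; omega
      have h3 : (2^(k+1+1)*q)/2 = 2^(k+1)*q := by rw [hE2]; omega
      apply Nat.eq_of_testBit_eq
      intro j
      cases j with
      | zero => simp [Nat.testBit_zero, e1, e2]
      | succ j =>
          rw [Nat.testBit_and, Nat.testBit_add_one, Nat.testBit_add_one, Nat.testBit_add_one]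
          rw [h1, h2, h3, ← Nat.testBit_and, ih]

theorem bitLength_two_pow (k : Nat) : PySem.Int.bitLength ((2^k : Nat) : Int) = k + 1 := by
  induction k with
  | zero => decide
  | succ k ih =>
      rw [PySem.Int.bitLength_natCast (by positivity)]
      have h : 2^(k+1)/2 = 2^k := by
        have : 2^(k+1) = 2*2^k := by ring
        omega
      rw [h, ih]

theorem coordsGoB_eq (n : Int) (T : Nat) :
    ∀ (M : Nat), M < 2 ^ T →
    coordsGoB n (M : Int)
      = ((List.range T).filter (fun j : Nat => M / 2 ^ j % 2 = 1)).map
          (fun j : Nat => (PySem.Int.mod (j : Int) n, PySem.Int.floordiv (j : Int) n)) := by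
  intro M
  induction M using Nat.strong_induction_on with
  | _ M ih =>
    intro hMT
    by_cases h0 : M = 0
    · subst h0
      rw [coordsGoB]
      simp [Nat.zero_div]
    · obtain ⟨k, o, ho, hMo⟩ := Nat.exists_eq_two_pow_mul_odd h0
      obtain ⟨q, hq⟩ := ho
      have hM : M = 2^k*(2*q+1) := by rw [hMo, hq]
      clear hMo hq h0
      set M2 : Nat := 2^(k+1)*q with hM2def
      have hsum : M = M2 + 2^k := by rw [hM, hM2def]; ring
      have hkpos : (0:Nat) < 2^k := by positivity
      have hMpos : 0 < M := by omega
      rw [coordsGoB]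
      rw [dif_neg (show ¬ ((M:Int) ≤ 0) by exact_mod_cast by omega)]
      have hcast1 : (M:Int) - 1 = ((M - 1 : Nat) : Int) := by omega
      have hband : PySem.Int.band (M:Int) ((M:Int) - 1) = (M2 : Int) := by
        rw [hcast1, PySem.Int.band_natCast, hM]
        norm_cast
        rw [land_clear_lowest, hM2def]
      have hdiff : (M:Int) - (M2:Int) = ((2^k : Nat) : Int) := by
        push_cast [hsum]; ring
      have hi : (PySem.Int.bitLength ((M:Int) - (M2:Int)) : Int) - 1 = (k : Int) := by
        rw [hdiff, bitLength_two_pow]; push_cast; ring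
      simp only [hband, hi]
      -- bit j of M for j < k is 0
      have bitM_lt : ∀ j, j < k → M / 2^j % 2 = 0 := by
        intro j hj
        have e1 : (2:Nat)^k = 2^j * 2^(k-j) := by rw [← pow_add]; congr 1; omega
        have e2 : (2:Nat)^(k-j) = 2 * 2^(k-j-1) := by rw [← pow_succ']; congr 1; omega
        have hE : M = 2^j * (2 * (2^(k-j-1)*(2*q+1))) := by rw [hM, e1, e2]; ring
        rw [hE, Nat.mul_div_cancel_left _ (by positivity : (0:Nat) < 2^j)]
        omega
      -- bit k of M is 1
      have bitM_k : M / 2^k % 2 = 1 := by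
        rw [hM, Nat.mul_div_cancel_left _ (by positivity : (0:Nat) < 2^k)]
        omega
      -- bits ≤ k of M2 are 0
      have bitM2_le : ∀ j, j ≤ k → M2 / 2^j % 2 = 0 := by
        intro j hj
        have e1 : (2:Nat)^(k+1) = 2^j * 2^(k+1-j) := by rw [← pow_add]; congr 1; omega
        have e2 : (2:Nat)^(k+1-j) = 2 * 2^(k-j) := by rw [← pow_succ']; congr 1; omega
        have hE : M2 = 2^j * (2 * (2^(k-j)*q)) := by rw [hM2def, e1, e2]; ring
        rw [hE, Nat.mul_div_cancel_left _ (by positivity : (0:Nat) < 2^j)]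
        omega
      -- bits above k agree between M and M2
      have bitEq_gt : ∀ j, k < j → M / 2^j = M2 / 2^j := by
        intro j hj
        have hMk : M / 2^(k+1) = q := by
          have hlt : (2:Nat)^k < 2^(k+1) := by
            have : (2:Nat)^(k+1) = 2*2^k := by ring
            omega
          have : M = 2^(k+1)*q + 2^k := by rw [hsum, hM2def]
          rw [this, Nat.mul_add_div (by positivity), Nat.div_eq_of_lt hlt]
          omega
        have hM2k : M2 / 2^(k+1) = q := by
          rw [hM2def, Nat.mul_div_cancel_left _ (by positivity : (0:Nat) < 2^(k+1))]
        have e1 : (2:Nat)^j = 2^(k+1) * 2^(j-k-1) := by rw [← pow_add]; congr 1; omega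
        rw [e1, ← Nat.div_div_eq_div_mul, ← Nat.div_div_eq_div_mul, hMk, hM2k]
      have hkT : k < T := by
        have h1 : (2:Nat)^k < 2^T := by omega
        exact (Nat.pow_lt_pow_iff_right (by norm_num)).mp h1
      -- split the range at the cleared bit
      have hrange : List.range T
          = (List.range k ++ [k]) ++ (List.range (T-(k+1))).map (fun x => (k+1) + x) := by
        conv_lhs => rw [show T = (k+1) + (T-(k+1)) by omega]
        rw [List.range_add, List.range_succ]
      have key : (List.range T).filter (fun j : Nat => M / 2 ^ j % 2 = 1)
          = k :: (List.range T).filter (fun j : Nat => M2 / 2 ^ j % 2 = 1) := by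
        rw [hrange, List.filter_append, List.filter_append,
            List.filter_append, List.filter_append]
        have f1 : (List.range k).filter (fun j : Nat => M / 2 ^ j % 2 = 1) = [] := by
          rw [List.filter_eq_nil_iff]
          intro j hj
          simp [bitM_lt j (List.mem_range.mp hj)]
        have f2 : [k].filter (fun j : Nat => M / 2 ^ j % 2 = 1) = [k] := by
          simp [bitM_k]
        have f3 : (List.range k).filter (fun j : Nat => M2 / 2 ^ j % 2 = 1) = [] := by
          rw [List.filter_eq_nil_iff]
          intro j hj
          simp [bitM2_le j (le_of_lt (List.mem_range.mp hj))]
        have f4 : [k].filter (fun j : Nat => M2 / 2 ^ j % 2 = 1) = [] := by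
          simp [bitM2_le k (le_refl k)]
        have f5 : ((List.range (T-(k+1))).map (fun x => (k+1) + x)).filter
              (fun j : Nat => M / 2 ^ j % 2 = 1)
            = ((List.range (T-(k+1))).map (fun x => (k+1) + x)).filter
              (fun j : Nat => M2 / 2 ^ j % 2 = 1) := by
          apply List.filter_congr
          intro j hj
          obtain ⟨x, _, hx⟩ := List.mem_map.mp hj
          rw [bitEq_gt j (by omega)]
        rw [f1, f2, f3, f4, f5]
        simp
      have hM2lt : M2 < M := by omega
      have hM2T : M2 < 2^T := by omega
      rw [ih M2 hM2lt hM2T, key, List.map_cons]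

theorem ports_agree (mask n : Int) :
    coords_from_bitmask_4x4 mask n = coords_from_bitmask_4x4_alt mask n := by
  have hT : (0:Int) ≤ n * n := mul_self_nonneg n
  set T : Nat := (n * n).toNat with hTdef
  have hshift : (1 : Int) <<< T = 2 ^ T := by rw [Int.shiftLeft_eq]; ring
  have hpos : (0:Int) < 2 ^ T := by positivity
  have hr0 : 0 ≤ mask % 2 ^ T := Int.emod_nonneg mask (ne_of_gt hpos)
  have hrlt : mask % 2 ^ T < 2 ^ T := Int.emod_lt_of_pos mask hpos
  have hcast : ((2 ^ T : Nat) : Int) = 2 ^ T := by push_cast; ring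
  have hM : (mask % 2 ^ T).toNat < 2 ^ T := by omega
  -- B side
  have hB : coords_from_bitmask_4x4_alt mask n
      = ((List.range T).filter (fun j : Nat => (mask % 2 ^ T).toNat / 2 ^ j % 2 = 1)).map
          (fun j : Nat => (PySem.Int.mod (j : Int) n, PySem.Int.floordiv (j : Int) n)) := by
    unfold coords_from_bitmask_4x4_alt
    rw [← hTdef, hshift, PySem.Int.mod_eq_emod_of_pos hpos]
    rw [show mask % 2 ^ T = (((mask % 2 ^ T).toNat : Nat) : Int) by omega]
    exact coordsGoB_eq n T _ hM
  -- A side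
  have hA : coords_from_bitmask_4x4 mask n
      = ((((List.range T).map (fun k : Nat => (0:Int) + (k : Int))).filter
          (fun x : Int => decide (PySem.Int.band (mask >>> ((x.toNat : Int))) 1 ≠ 0))).map
          (fun i : Int => (PySem.Int.mod i n, PySem.Int.floordiv i n))) := by
    unfold coords_from_bitmask_4x4
    rw [PySem.List.pyRange_one]
    rw [foldlA_eq, List.nil_append, sub_zero, ← hTdef]
  rw [hA, hB, List.filter_map, List.map_map]
  have hfilter : ((List.range T).filter ((fun x : Int => decide (PySem.Int.band (mask >>> ((x.toNat : Int))) 1 ≠ 0)) ∘ (fun k : Nat => (0:Int) + (k : Int))))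
      = (List.range T).filter (fun j : Nat => (mask % 2 ^ T).toNat / 2 ^ j % 2 = 1) := by
    apply List.filter_congr
    intro j hj
    have hjT : j < T := List.mem_range.mp hj
    simp only [Function.comp_apply, zero_add, Int.toNat_natCast]
    apply decide_eq_decide.mpr
    rw [band_one_eq, Int.shiftRight_natCast_right, Int.shiftRight_eq_div_pow]
    push_cast
    rw [window_bit mask T j hjT]
    omega
  rw [hfilter]
  apply List.map_congr_left
  intro j _
  simp only [Function.comp_apply, zero_add]

-- ===== VERDICT (by name: the statement is the Claim_ definition above) =====
theorem coords_from_bitmask_4x4_spec : Claim_equal_coords_from_bitmask_4x4 := by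
  intro mask n _
  unfold Spec_coords_from_bitmask_4x4
  exact ports_agree mask n
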